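-- pv_equiv track=rewrite | github.com/PRPP187/village-ai-dashboard | jecsu30.py | get_edge_positions
-- ===== SOURCE A (Python) =====
-- def get_edge_positions(rows, cols):
--     """ ✅ คืนค่าตำแหน่งขอบของ Grid โดยป้องกันค่าเกินขอบเขต """
--     edge_positions = []
--     for r in range(rows):
--         for c in range(cols):
--             if r == 0 or r == rows - 1 or c == 0 or c == cols - 1:
--                 if 0 <= r < rows and 0 <= c < cols:  # ✅ เช็คก่อนบันทึก
--                     edge_positions.append((r, c))
--     return edge_positions
-- ===== SOURCE B (Python) =====
-- def get_edge_positions(rows, cols):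
--     """Directly emit border cells: full top row, first/last column of middle rows, full bottom row."""
--     if rows <= 0 or cols <= 0:
--         return []
--     if rows == 1:
--         return [(0, c) for c in range(cols)]
--     edge = [(0, c) for c in range(cols)]
--     for r in range(1, rows - 1):
--         edge.append((r, 0))
--         if cols > 1:
--             edge.append((r, cols - 1))
--     edge += [(rows - 1, c) for c in range(cols)]
--     return edge
-- ===== Notes on version B (the rewrite author's own statement) =====
-- stated objective: faster
-- what changed: Instead of scanning every cell of the rows x cols grid and testing a border condition, B emits the border cells directly: the full top row, the first/last column of each middle row, and the full bottom row.
import Mathlib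
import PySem

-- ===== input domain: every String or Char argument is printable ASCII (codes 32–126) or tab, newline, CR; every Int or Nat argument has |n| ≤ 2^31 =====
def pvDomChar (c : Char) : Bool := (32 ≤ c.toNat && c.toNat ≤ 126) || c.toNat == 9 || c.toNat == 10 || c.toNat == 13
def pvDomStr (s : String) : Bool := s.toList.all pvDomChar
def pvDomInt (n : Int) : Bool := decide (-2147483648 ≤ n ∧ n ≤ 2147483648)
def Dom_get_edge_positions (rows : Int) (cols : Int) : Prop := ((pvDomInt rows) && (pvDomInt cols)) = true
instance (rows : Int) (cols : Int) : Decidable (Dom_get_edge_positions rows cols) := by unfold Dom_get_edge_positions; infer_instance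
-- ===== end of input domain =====

-- B replaces A's full-grid scan with direct emission of the border cells (asymptotically faster: O(rows+cols) vs O(rows*cols)).

-- ===== PORT A =====
def get_edge_positions (rows : Int) (cols : Int) : List (Int × Int) :=
  (PySem.List.pyRange 0 rows 1).foldl (fun edge_positions r =>
    (PySem.List.pyRange 0 cols 1).foldl (fun ep c =>
      if r = 0 ∨ r = rows - 1 ∨ c = 0 ∨ c = cols - 1 then
        if 0 ≤ r ∧ r < rows ∧ 0 ≤ c ∧ c < cols then ep ++ [(r, c)] else ep
      else ep) edge_positions) []

-- ===== PORT B =====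
def get_edge_positions_alt (rows : Int) (cols : Int) : List (Int × Int) :=
  if rows ≤ 0 ∨ cols ≤ 0 then []
  else if rows = 1 then (PySem.List.pyRange 0 cols 1).map (fun c => ((0 : Int), c))
  else
    ((PySem.List.pyRange 1 (rows - 1) 1).foldl (fun edge r =>
        let edge := edge ++ [(r, (0 : Int))]
        if 1 < cols then edge ++ [(r, cols - 1)] else edge)
      ((PySem.List.pyRange 0 cols 1).map (fun c => ((0 : Int), c))))
    ++ (PySem.List.pyRange 0 cols 1).map (fun c => (rows - 1, c))

-- ===== PRECONDITION & SPEC =====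
def Spec_get_edge_positions (rows : Int) (cols : Int) (out : List (Int × Int)) : Prop := out = get_edge_positions_alt rows cols
instance (rows : Int) (cols : Int) (out : List (Int × Int)) : Decidable (Spec_get_edge_positions rows cols out) := by unfold Spec_get_edge_positions; infer_instance

-- ===== CLAIM (what is proved, stated in full; the proofs are below) =====
def Claim_equal_get_edge_positions : Prop := ∀ (rows : Int) (cols : Int), Dom_get_edge_positions rows cols → Spec_get_edge_positions rows cols (get_edge_positions rows cols)

-- ===== LEMMAS AND PROOFS =====

-- A as a flatMap over the grid: the bounds check inside A is always true on the ranges.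
theorem getA_eq_flatMap (rows cols : Int) :
    get_edge_positions rows cols =
      (PySem.List.pyRange 0 rows 1).flatMap (fun r =>
        (PySem.List.pyRange 0 cols 1).flatMap (fun c =>
          if r = 0 ∨ r = rows - 1 ∨ c = 0 ∨ c = cols - 1 then [(r, c)] else [])) := by
  unfold get_edge_positions
  rw [PySem.List.foldl_congr_mem (g := fun acc r =>
    acc ++ (PySem.List.pyRange 0 cols 1).flatMap (fun c =>
      if r = 0 ∨ r = rows - 1 ∨ c = 0 ∨ c = cols - 1 then [(r, c)] else []))
    (h := by
      intro acc r hr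
      rw [PySem.List.mem_pyRange_one] at hr
      rw [PySem.List.foldl_congr_mem (g := fun ep c =>
        ep ++ (if r = 0 ∨ r = rows - 1 ∨ c = 0 ∨ c = cols - 1 then [(r, c)] else []))
        (h := by
          intro ep c hc
          rw [PySem.List.mem_pyRange_one] at hc
          by_cases h : r = 0 ∨ r = rows - 1 ∨ c = 0 ∨ c = cols - 1
          · simp only [h, if_true]
            have hb : 0 ≤ r ∧ r < rows ∧ 0 ≤ c ∧ c < cols := by omega
            simp [hb]
          · simp [h])]
      rw [PySem.List.foldl_append_eq_flatMap])]
  rw [PySem.List.foldl_append_eq_flatMap]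
  simp

-- a row of A whose r is neither 0 nor rows-1 contributes only its first and (if distinct) last column
theorem middle_row (rows cols r : Int) (hc : 1 ≤ cols) (hr0 : r ≠ 0) (hr1 : r ≠ rows - 1) :
    (PySem.List.pyRange 0 cols 1).flatMap (fun c =>
        if r = 0 ∨ r = rows - 1 ∨ c = 0 ∨ c = cols - 1 then [(r, c)] else []) =
      [(r, (0 : Int))] ++ (if 1 < cols then [(r, cols - 1)] else []) := by
  by_cases h2 : 1 < cols
  · rw [PySem.List.pyRange_one_append 0 1 cols (by omega) (by omega),
        PySem.List.pyRange_one_append 1 (cols - 1) cols (by omega) (by omega),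
        (by decide : PySem.List.pyRange (0 : Int) 1 1 = [(0 : Int)])]
    have hlast : PySem.List.pyRange (cols - 1) cols 1 = [cols - 1] := by
      have h := PySem.List.pyRange_one_singleton (cols - 1)
      rwa [(by omega : cols - 1 + 1 = cols)] at h
    rw [hlast]
    simp only [List.flatMap_append, List.flatMap_cons, List.flatMap_nil]
    have hmid : (PySem.List.pyRange 1 (cols - 1) 1).flatMap (fun c =>
        if r = 0 ∨ r = rows - 1 ∨ c = 0 ∨ c = cols - 1 then [(r, c)] else []) = [] := by
      rw [List.flatMap_eq_nil_iff]
      intro c hcm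
      rw [PySem.List.mem_pyRange_one] at hcm
      have : ¬ (r = 0 ∨ r = rows - 1 ∨ c = 0 ∨ c = cols - 1) := by omega
      simp [this]
    rw [hmid]
    have hl : r = 0 ∨ r = rows - 1 ∨ (0 : Int) = 0 ∨ (0 : Int) = cols - 1 := by omega
    have hr : r = 0 ∨ r = rows - 1 ∨ cols - 1 = 0 ∨ cols - 1 = cols - 1 := by omega
    simp [h2]
  · have hc1 : cols = 1 := by omega
    subst hc1
    rw [(by decide : PySem.List.pyRange (0 : Int) 1 1 = [(0 : Int)])]
    simp

-- rows of A whose r is 0 or rows-1 contribute every column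
theorem full_row (rows cols r : Int) (hb : r = 0 ∨ r = rows - 1) :
    (PySem.List.pyRange 0 cols 1).flatMap (fun c =>
        if r = 0 ∨ r = rows - 1 ∨ c = 0 ∨ c = cols - 1 then [(r, c)] else []) =
      (PySem.List.pyRange 0 cols 1).map (fun c => (r, c)) := by
  have hcg : ∀ c ∈ PySem.List.pyRange 0 cols 1,
      (if r = 0 ∨ r = rows - 1 ∨ c = 0 ∨ c = cols - 1 then [(r, c)] else []) = [(r, c)] := by
    intro c _
    have h : r = 0 ∨ r = rows - 1 ∨ c = 0 ∨ c = cols - 1 := by tauto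
    simp [h]
  rw [List.flatMap_congr hcg]
  exact Eq.symm List.map_eq_flatMap

-- B's middle-rows loop as a flatMap
theorem alt_loop (rows cols : Int) (init : List (Int × Int)) :
    (PySem.List.pyRange 1 (rows - 1) 1).foldl (fun edge r =>
        let edge := edge ++ [(r, (0 : Int))]
        if 1 < cols then edge ++ [(r, cols - 1)] else edge) init =
      init ++ (PySem.List.pyRange 1 (rows - 1) 1).flatMap (fun r =>
        [(r, (0 : Int))] ++ (if 1 < cols then [(r, cols - 1)] else [])) := by
  rw [PySem.List.foldl_congr_mem (g := fun edge r =>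
        edge ++ ([(r, (0 : Int))] ++ (if 1 < cols then [(r, cols - 1)] else [])))
    (h := by
      intro acc r _
      by_cases h : 1 < cols <;> simp [h])]
  rw [PySem.List.foldl_append_eq_flatMap]

-- ===== VERDICT (by name: the statement is the Claim_ definition above) =====
theorem get_edge_positions_spec : Claim_equal_get_edge_positions := by
  intro rows cols _
  unfold Spec_get_edge_positions get_edge_positions_alt
  rw [getA_eq_flatMap]
  by_cases h0 : rows ≤ 0 ∨ cols ≤ 0
  · rw [if_pos h0]
    rcases h0 with h | h
    · rw [PySem.List.pyRange_one_eq_nil h]; simp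
    · rw [List.flatMap_eq_nil_iff]
      intro r _
      rw [PySem.List.pyRange_one_eq_nil h]; simp
  · rw [if_neg h0]
    by_cases h1 : rows = 1
    · subst h1
      rw [if_pos rfl]
      rw [(by decide : PySem.List.pyRange (0 : Int) 1 1 = [0])]
      simp only [List.flatMap_cons, List.flatMap_nil, List.append_nil]
      exact full_row 1 cols 0 (Or.inl rfl)
    · rw [if_neg h1]
      have h2 : 2 ≤ rows := by omega
      rw [PySem.List.pyRange_one_append 0 1 rows (by omega) (by omega),
          PySem.List.pyRange_one_append 1 (rows - 1) rows (by omega) (by omega)]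
      have ha : PySem.List.pyRange (0 : Int) 1 1 = [0] := by decide
      have hbot : PySem.List.pyRange (rows - 1) rows 1 = [rows - 1] := by
        have h := PySem.List.pyRange_one_singleton (rows - 1)
        rwa [(by omega : rows - 1 + 1 = rows)] at h
      rw [ha, hbot, List.flatMap_append, List.flatMap_append,
          List.flatMap_cons, List.flatMap_nil, List.flatMap_cons, List.flatMap_nil]
      rw [full_row rows cols 0 (Or.inl rfl), full_row rows cols (rows - 1) (Or.inr rfl)]
      have hmidcg : ∀ r ∈ PySem.List.pyRange 1 (rows - 1) 1,
          ((PySem.List.pyRange 0 cols 1).flatMap (fun c =>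
            if r = 0 ∨ r = rows - 1 ∨ c = 0 ∨ c = cols - 1 then [(r, c)] else [])) =
          ([(r, (0 : Int))] ++ (if 1 < cols then [(r, cols - 1)] else [])) := by
        intro r hr
        rw [PySem.List.mem_pyRange_one] at hr
        exact middle_row rows cols r (by omega) (by omega) (by omega)
      rw [List.flatMap_congr hmidcg, alt_loop]
      simp [List.append_assoc]
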